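-- pv_equiv track=rewrite | github.com/leekayden/lionsforge-makeathon | timetable-sync/list_time_diff.py | strdatetime
-- ===== SOURCE A (Python) =====
-- def strdatetime(x):
--     sub = []
--     substr = ""
--     y = str(x)
--     if len(y) == 3:
--         for i in y:
--             sub.append(i)
--         sub.insert(0,'0')
--         sub.insert(2,':')
--     elif len(y) == 4:
--         for i in y:
--             sub.append(i)
--         sub.insert(2,':')
--     for i in sub:
--         substr += i
--     return substr
-- ===== SOURCE B (Python) =====
-- def strdatetime(x):
--     y = str(x)
--     if len(y) not in (3, 4):
--         return ""
--     if len(y) == 3: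
--         y = '0' + y
--     return y[:2] + ":" + y[2:]
-- ===== Notes on version B (the rewrite author's own statement) =====
-- stated objective: simpler
-- what changed: Replaces the char-copy loops, list inserts and manual join with direct string slicing: pad the shorter accepted form with a leading zero character, then return y[:2] + ':' + y[2:].
import Mathlib
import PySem

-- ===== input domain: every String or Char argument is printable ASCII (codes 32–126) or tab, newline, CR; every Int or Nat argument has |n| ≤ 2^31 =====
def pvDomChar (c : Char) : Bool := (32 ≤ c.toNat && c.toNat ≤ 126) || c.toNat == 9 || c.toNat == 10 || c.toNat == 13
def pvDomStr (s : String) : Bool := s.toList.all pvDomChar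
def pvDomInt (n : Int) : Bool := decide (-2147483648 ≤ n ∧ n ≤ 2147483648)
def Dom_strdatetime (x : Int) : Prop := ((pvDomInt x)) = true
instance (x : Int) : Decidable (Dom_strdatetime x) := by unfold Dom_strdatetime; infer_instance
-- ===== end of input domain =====

-- B replaces A's char-copy loops, list inserts and manual join by string slicing ('simpler'; return value only).

-- ===== PORT A =====
def strdatetime (x : Int) : String :=
  let y := PySem.Int.toStr x
  let yl := y.toList
  let sub : List Char :=
    if yl.length = 3 then
      PySem.List.insert (PySem.List.insert (yl.foldl (fun a c => a ++ [c]) ([] : List Char)) 0 '0') 2 ':'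
    else if yl.length = 4 then
      PySem.List.insert (yl.foldl (fun a c => a ++ [c]) ([] : List Char)) 2 ':'
    else []
  sub.foldl (fun acc c => acc.push c) ""

-- ===== PORT B =====
def strdatetime_alt (x : Int) : String :=
  let y := PySem.Int.toStr x
  let n := y.toList.length
  if ¬ (n = 3 ∨ n = 4) then ""
  else
    let z : List Char := if n = 3 then '0' :: y.toList else y.toList
    String.ofList (PySem.List.slice z none (some 2)) ++ ":" ++ String.ofList (PySem.List.slice z (some 2) none)

-- ===== PRECONDITION & SPEC =====
def Spec_strdatetime (x : Int) (out : String) : Prop := out = strdatetime_alt x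
instance (x : Int) (out : String) : Decidable (Spec_strdatetime x out) := by unfold Spec_strdatetime; infer_instance

-- ===== CLAIM (what is proved, stated in full; the proofs are below) =====
def Claim_equal_strdatetime : Prop := ∀ (x : Int), Dom_strdatetime x → Spec_strdatetime x (strdatetime x)

-- ===== LEMMAS AND PROOFS =====

theorem foldl_push_eq (l : List Char) (s : String) :
    l.foldl (fun acc c => acc.push c) s = s ++ String.ofList l := by
  induction l generalizing s with
  | nil => simp
  | cons c t ih =>
    rw [List.foldl_cons, ih, String.push_eq_append, String.append_assoc,
      String.singleton_eq_ofList, ← String.ofList_append]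
    rfl

theorem foldl_app_eq (s : List Char) (l : List Char) :
    l.foldl (fun a c => a ++ [c]) s = s ++ l := by
  induction l generalizing s with
  | nil => simp
  | cons c t ih => simp [ih]

theorem core_eq (y : String) :
    (let yl := y.toList
     let sub : List Char :=
       if yl.length = 3 then
         PySem.List.insert (PySem.List.insert (yl.foldl (fun a c => a ++ [c]) ([] : List Char)) 0 '0') 2 ':'
       else if yl.length = 4 then
         PySem.List.insert (yl.foldl (fun a c => a ++ [c]) ([] : List Char)) 2 ':'
       else []
     sub.foldl (fun acc c => acc.push c) "")
    =
    (let n := y.toList.length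
     if ¬ (n = 3 ∨ n = 4) then ""
     else
       let z : List Char := if n = 3 then '0' :: y.toList else y.toList
       String.ofList (PySem.List.slice z none (some 2)) ++ ":" ++ String.ofList (PySem.List.slice z (some 2) none)) := by
  have hcol : (":" : String) = String.ofList [':'] := rfl
  rcases hl : y.toList with _ | ⟨a, _ | ⟨b, _ | ⟨c, _ | ⟨d, _ | ⟨e, t⟩⟩⟩⟩⟩ <;>
    simp [foldl_push_eq, foldl_app_eq, PySem.List.insert_zero, PySem.List.insert,
      PySem.List.slice, PySem.List.sliceIndices, PySem.List.clampIdx,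
      String.push_eq_append, String.singleton_eq_ofList, hcol] <;>
    simp [hcol, show ("0" : String) = String.ofList ['0'] from rfl, ← String.ofList_append,
      String.append_assoc] <;>
    rw [show ("0" : String) = String.ofList ['0'] from rfl, ← String.append_assoc,
      ← String.ofList_append] <;> rfl

-- ===== VERDICT (by name: the statement is the Claim_ definition above) =====
theorem strdatetime_spec : Claim_equal_strdatetime := by
  intro x _
  unfold Spec_strdatetime strdatetime strdatetime_alt
  exact core_eq (PySem.Int.toStr x)
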